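-- pv_equiv track=rewrite | github.com/mila-iqia/COVI-AgentSim | src/covid19sim/interventions/tracing.py | compute_max_risk_history
-- ===== SOURCE A (Python) =====
-- def compute_max_risk_history(risk_histories):
--     """ Takes the element-wise maximum over all risk histories
--     Args:
--         risk_histories (list of lists): Each outcome from the previous rules (symptoms, tests, messages)
--     Returns:
--         risk_history (array): an element-wise maximum over the outcomes
--     """
--     longest_length = max([len(x) for x in risk_histories])
--     risk_history = []
--     for i in range(longest_length):
--         vals = []
--         for r in risk_histories:
--             try:
--                  vals.append(r[i])
--             except IndexError:
--                 pass
--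
--         risk_history.append(max(vals))
--     return risk_history
-- ===== SOURCE B (Python) =====
-- def _merge(acc, r):
--     out = [max(x, y) for x, y in zip(acc, r)]
--     k = len(out)
--     out.extend(acc[k:])
--     out.extend(r[k:])
--     return out
--
--
-- def compute_max_risk_history(risk_histories):
--     acc = []
--     for r in risk_histories:
--         acc = _merge(acc, r)
--     return acc
-- ===== Notes on version B (the rewrite author's own statement) =====
-- stated objective: alternative
-- what changed: Instead of scanning every history at every index position (collecting present elements with a try/except and taking max per column), B folds the histories once through a length-extending elementwise-max merge of the running result with each history.
-- crash fix: A raises ValueError (max() of an empty sequence) exactly when risk_histories is the empty list; B returns [] there. — e.g. on compute_max_risk_history([]): A raises ValueError, B returns []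
import Mathlib
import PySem

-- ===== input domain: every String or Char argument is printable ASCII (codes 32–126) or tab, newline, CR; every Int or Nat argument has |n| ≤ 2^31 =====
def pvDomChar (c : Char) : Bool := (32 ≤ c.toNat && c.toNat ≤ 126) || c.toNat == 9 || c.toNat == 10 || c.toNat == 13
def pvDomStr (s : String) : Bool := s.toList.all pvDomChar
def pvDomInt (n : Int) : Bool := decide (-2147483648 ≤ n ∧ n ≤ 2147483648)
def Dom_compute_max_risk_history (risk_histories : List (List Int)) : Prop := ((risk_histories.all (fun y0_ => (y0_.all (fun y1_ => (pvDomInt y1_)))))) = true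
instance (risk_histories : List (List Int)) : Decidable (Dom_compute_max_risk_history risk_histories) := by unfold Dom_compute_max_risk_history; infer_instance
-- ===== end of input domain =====

-- B replaces A's index-by-index scan over all histories (with try/except per element)
-- by one elementwise-max merge of a running result with each history; objective: alternative (single pass over the elements).


-- ===== PORT A =====
def compute_max_risk_history (risk_histories : List (List Int)) : List Int :=
  match PySem.List.max? (risk_histories.map (fun x => (x.length : Int))) (fun y => y) with
  | none => []   -- Python: max([]) raises ValueError; excluded by Pre_
  | some longest_length =>
    (PySem.List.pyRange 0 longest_length 1).foldl (fun risk_history i =>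
      let vals := risk_histories.foldl (fun vs r =>
        match PySem.List.pyGet? r i with   -- try: vals.append(r[i])  except IndexError: pass
        | some v => vs ++ [v]
        | none => vs) []
      -- max(vals): for every i in range(longest_length) some history has length > i, so vals ≠ []
      risk_history ++ [(PySem.List.max? vals (fun y => y)).getD 0]) []

-- ===== PORT B =====
def pvMerge (acc r : List Int) : List Int :=
  let out := (acc.zip r).map (fun p => max p.1 p.2)
  let k := out.length
  out ++ acc.drop k ++ r.drop k

def compute_max_risk_history_alt (risk_histories : List (List Int)) : List Int :=
  risk_histories.foldl pvMerge []

-- ===== PRECONDITION & SPEC =====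
-- Pre_ excludes only the empty outer list, on which Python's max([]) raises ValueError.
def Pre_compute_max_risk_history (risk_histories : List (List Int)) : Prop :=
  risk_histories ≠ []
instance (risk_histories : List (List Int)) : Decidable (Pre_compute_max_risk_history risk_histories) := by unfold Pre_compute_max_risk_history; infer_instance

def pvWitness_compute_max_risk_history : List (List Int) := [[1, 5], [2], [0, 3, 4]]

-- A raises ValueError (max of an empty sequence) exactly on the empty input list; B returns [] there.
def Raises_compute_max_risk_history (risk_histories : List (List Int)) : Prop :=
  risk_histories = []
instance (risk_histories : List (List Int)) : Decidable (Raises_compute_max_risk_history risk_histories) := by unfold Raises_compute_max_risk_history; infer_instance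
def pvRaiseWitness_compute_max_risk_history : List (List Int) := []
def pvRaiseWitnessOut_compute_max_risk_history : List Int := []

def Spec_compute_max_risk_history (risk_histories : List (List Int)) (out : List Int) : Prop := out = compute_max_risk_history_alt risk_histories
instance (risk_histories : List (List Int)) (out : List Int) : Decidable (Spec_compute_max_risk_history risk_histories out) := by unfold Spec_compute_max_risk_history; infer_instance

-- ===== CLAIM (what is proved, stated in full; the proofs are below) =====
def Claim_equal_compute_max_risk_history : Prop := ∀ (risk_histories : List (List Int)), Dom_compute_max_risk_history risk_histories → Pre_compute_max_risk_history risk_histories → Spec_compute_max_risk_history risk_histories (compute_max_risk_history risk_histories)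

def Claim_raises_compute_max_risk_history : Prop := (∀ (risk_histories : List (List Int)), Dom_compute_max_risk_history risk_histories → Raises_compute_max_risk_history risk_histories → ¬ Pre_compute_max_risk_history risk_histories) ∧ (Dom_compute_max_risk_history (pvRaiseWitness_compute_max_risk_history) ∧ Raises_compute_max_risk_history (pvRaiseWitness_compute_max_risk_history) ∧ compute_max_risk_history_alt (pvRaiseWitness_compute_max_risk_history) = pvRaiseWitnessOut_compute_max_risk_history)

-- ===== LEMMAS AND PROOFS =====

-- max of two optional values: none = "absent" (Python's skipped IndexError)
def pvOmax : Option Int → Option Int → Option Int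
  | none, o => o
  | some x, none => some x
  | some x, some y => some (max x y)

theorem pvMerge_nil_left (b : List Int) : pvMerge [] b = b := by
  simp [pvMerge]

theorem pvMerge_nil_right (a : List Int) : pvMerge a [] = a := by
  simp [pvMerge]

theorem pvMerge_cons (x y : Int) (as bs : List Int) :
    pvMerge (x :: as) (y :: bs) = max x y :: pvMerge as bs := by
  simp [pvMerge]

theorem pvMerge_getElem? (a b : List Int) (i : Nat) :
    (pvMerge a b)[i]? = pvOmax a[i]? b[i]? := by
  induction a generalizing b i with
  | nil => simp [pvMerge_nil_left, pvOmax]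
  | cons x as ih =>
    cases b with
    | nil => cases a' : (x :: as)[i]? <;> simp_all [pvMerge_nil_right, pvOmax]
    | cons y bs =>
      rw [pvMerge_cons]
      cases i with
      | zero => simp [pvOmax]
      | succ n => simpa using ih bs n

theorem foldl_pvMerge_getElem? (xs : List (List Int)) (acc : List Int) (i : Nat) :
    (xs.foldl pvMerge acc)[i]? = xs.foldl (fun o r => pvOmax o r[i]?) acc[i]? := by
  induction xs generalizing acc with
  | nil => rfl
  | cons h t ih => simp [List.foldl_cons, ih, pvMerge_getElem?]

theorem foldl_omax_some (f : List Int → Option Int) (xs : List (List Int)) (v : Int) :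
    xs.foldl (fun o r => pvOmax o (f r)) (some v)
      = some ((xs.filterMap f).foldl max v) := by
  induction xs generalizing v with
  | nil => rfl
  | cons h t ih =>
    cases hf : f h with
    | none =>
      rw [List.foldl_cons, hf, List.filterMap_cons_none hf]
      exact ih v
    | some y =>
      rw [List.foldl_cons, hf, List.filterMap_cons_some hf]
      exact ih (max v y)

theorem foldl_omax_none (f : List Int → Option Int) (xs : List (List Int)) :
    xs.foldl (fun o r => pvOmax o (f r)) none
      = PySem.List.max? (xs.filterMap f) (fun y => y) := by
  induction xs with
  | nil => rfl
  | cons h t ih =>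
    cases hf : f h with
    | none =>
      rw [List.foldl_cons, hf, List.filterMap_cons_none hf]
      exact ih
    | some y =>
      rw [List.foldl_cons, hf, List.filterMap_cons_some hf, PySem.List.max?_id_cons]
      exact foldl_omax_some f t y

-- A's inner loop builds exactly the filterMap of the present elements
theorem vals_eq_filterMap (xs : List (List Int)) (i : Int) (acc : List Int) :
    xs.foldl (fun vs r =>
      match PySem.List.pyGet? r i with
      | some v => vs ++ [v]
      | none => vs) acc = acc ++ xs.filterMap (fun r => PySem.List.pyGet? r i) := by
  induction xs generalizing acc with
  | nil => simp
  | cons h t ih =>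
    cases hg : PySem.List.pyGet? h i <;> simp [List.foldl_cons, hg, ih]

-- the running max of lengths, cast to Int, is A's running max of casted lengths
theorem foldl_max_len_cast (t : List (List Int)) (a : Nat) :
    (t.map (fun x => (x.length : Int))).foldl max (a : Int)
      = ((t.foldl (fun n r => max n r.length) a : Nat) : Int) := by
  induction t generalizing a with
  | nil => rfl
  | cons h s ih =>
    simp only [List.map_cons, List.foldl_cons, ← Nat.cast_max]
    exact ih _

theorem lt_foldl_max_len (xs : List (List Int)) (a i : Nat)
    (h : i < xs.foldl (fun n r => max n r.length) a) :
    i < a ∨ ∃ r ∈ xs, i < r.length := by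
  induction xs generalizing a with
  | nil => exact Or.inl h
  | cons hd t ih =>
    rcases ih (max a hd.length) h with h' | ⟨r, hr, hlen⟩
    · rcases lt_max_iff.mp h' with h'' | h''
      · exact Or.inl h''
      · exact Or.inr ⟨hd, List.mem_cons_self, h''⟩
    · exact Or.inr ⟨r, List.mem_cons_of_mem _ hr, hlen⟩

theorem init_le_foldl_max_len (xs : List (List Int)) (a : Nat) :
    a ≤ xs.foldl (fun n r => max n r.length) a := by
  induction xs generalizing a with
  | nil => exact Nat.le_refl a
  | cons h t ih => exact le_trans (Nat.le_max_left _ _) (ih (max a h.length))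

theorem mem_le_foldl_max_len (xs : List (List Int)) (a : Nat) (r : List Int)
    (hr : r ∈ xs) : r.length ≤ xs.foldl (fun n r => max n r.length) a := by
  induction xs generalizing a with
  | nil => cases hr
  | cons h t ih =>
    rcases List.mem_cons.mp hr with rfl | hr'
    · exact le_trans (Nat.le_max_right a r.length) (init_le_foldl_max_len t _)
    · exact ih _ hr'

-- A on a nonempty input is a map over the index range
theorem A_cons (h : List Int) (t : List (List Int)) :
    compute_max_risk_history (h :: t)
      = (PySem.List.pyRange 0 ((t.foldl (fun n r => max n r.length) h.length : Nat) : Int) 1).map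
          (fun i => (PySem.List.max? ((h :: t).filterMap (fun r => PySem.List.pyGet? r i)) (fun y => y)).getD 0) := by
  unfold compute_max_risk_history
  rw [List.map_cons, PySem.List.max?_id_cons, foldl_max_len_cast]
  simp only [PySem.List.foldl_append_singleton_eq_map, vals_eq_filterMap, List.nil_append]

-- ===== VERDICT (by name: the statement is the Claim_ definition above) =====
theorem compute_max_risk_history_raises : Claim_raises_compute_max_risk_history := by
  unfold Claim_raises_compute_max_risk_history
  exact ⟨fun r _ h hp => hp h, by decide⟩

theorem compute_max_risk_history_spec : Claim_equal_compute_max_risk_history := by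
  intro rhs hdom hpre
  unfold Spec_compute_max_risk_history
  cases rhs with
  | nil => exact absurd hpre (compute_max_risk_history_raises.1 [] hdom rfl)
  | cons h t =>
    have hB : ∀ i : Nat, (compute_max_risk_history_alt (h :: t))[i]?
        = PySem.List.max? ((h :: t).filterMap (fun r => r[i]?)) (fun y => y) := by
      intro i
      unfold compute_max_risk_history_alt
      rw [foldl_pvMerge_getElem?]
      simpa using foldl_omax_none (fun r => r[i]?) (h :: t)
    symm
    apply List.ext_getElem?
    intro i
    set L : Nat := t.foldl (fun n r => max n r.length) h.length with hL
    rw [hB i, A_cons]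
    rw [List.getElem?_map, PySem.List.getElem?_pyRange_one]
    by_cases hi : i < L
    · have hlt : (i : Int) < ((L : Nat) : Int) := by exact_mod_cast hi
      rw [if_pos (by omega)]
      simp only [zero_add, PySem.List.pyGet?_natCast, Option.map_some]
      -- vals is nonempty: some history has length > i
      have hex : ∃ r ∈ h :: t, i < r.length := by
        rcases lt_foldl_max_len t h.length i (by simpa using hi) with h' | ⟨r, hr, hlen⟩
        · exact ⟨h, List.mem_cons_self, h'⟩
        · exact ⟨r, List.mem_cons_of_mem _ hr, hlen⟩
      obtain ⟨r, hr, hlen⟩ := hex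
      have hne : (h :: t).filterMap (fun r => r[i]?) ≠ [] := by
        intro hnil
        have := (List.filterMap_eq_nil_iff.mp hnil) r hr
        rw [List.getElem?_eq_getElem hlen] at this
        simp at this
      obtain ⟨v, hv⟩ := Option.ne_none_iff_exists'.mp
        (fun hnone => hne ((PySem.List.max?_eq_none_iff
          ((h :: t).filterMap (fun r => r[i]?)) (fun y => y)).mp hnone))
      rw [hv]
      simp
    · rw [if_neg (by omega)]
      have hall : (h :: t).filterMap (fun r => r[i]?) = [] := by
        apply List.filterMap_eq_nil_iff.mpr
        intro r hr
        apply List.getElem?_eq_none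
        have hle := mem_le_foldl_max_len (h :: t) 0 r hr
        simp only [List.foldl_cons, Nat.zero_max] at hle
        rw [← hL] at hle
        omega
      rw [hall]
      simp [PySem.List.max?]
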